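-- pv_equiv track=rewrite | github.com/hummusonrails/mcp-applemusic | src/applemusic_mcp/server.py | _build_track_results
-- ===== SOURCE A (Python) =====
-- def _build_track_results(
--     results: list[str],
--     errors: list[str],
--     success_prefix: str = "✓",
--     error_prefix: str = "✗",
--     success_verb: str = "processed",
--     error_verb: str = "failed",
-- ) -> str:
--     """Build formatted results message from success/error lists.
--
--     Args:
--         results: List of success messages
--         errors: List of error messages
--         success_prefix: Prefix for success section (default: ✓)
--         error_prefix: Prefix for error section (default: ✗)
--         success_verb: Verb for success count (default: processed)
--         error_verb: Verb for error count (default: failed)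
--
--     Returns:
--         Formatted multi-line message, or "No tracks were processed" if empty
--     """
--     output = []
--
--     if results:
--         output.append(f"{success_prefix} {success_verb.capitalize()} {len(results)} track(s):")
--         for r in results:
--             output.append(f"  {r}")
--
--     if errors:
--         if output:
--             output.append("")  # Blank line between sections
--         output.append(f"{error_prefix} {error_verb.capitalize()} {len(errors)} track(s):")
--         for e in errors:
--             output.append(f"  {e}")
--
--     if not output:
--         return f"No tracks were {success_verb}"
--
--     return "\n".join(output)
-- ===== SOURCE B (Python) =====
-- def _build_track_results(
--     results: list[str],
--     errors: list[str],
--     success_prefix: str = "✓",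
--     error_prefix: str = "✗",
--     success_verb: str = "processed",
--     error_verb: str = "failed",
-- ) -> str:
--     def render(specs):
--         # Recursive renderer over section descriptors; returns None for "nothing".
--         if not specs:
--             return None
--         pfx, verb, items = specs[0]
--         tail = render(specs[1:])
--         if not items:
--             return tail
--         block = f"{pfx} {verb.capitalize()} {len(items)} track(s):"
--         for it in items:
--             block += f"\n  {it}"
--         return block if tail is None else block + "\n\n" + tail
--     msg = render([(success_prefix, success_verb, results),
--                   (error_prefix, error_verb, errors)])
--     return f"No tracks were {success_verb}" if msg is None else msg
-- ===== Notes on version B (the rewrite author's own statement) =====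
-- stated objective: alternative
-- what changed: B replaces A's imperative flat line-list with appended blank separator and final join by a recursive renderer over a list of (prefix, verb, items) section descriptors that builds each section by direct string concatenation and combines them through an Option accumulator.
import Mathlib
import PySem

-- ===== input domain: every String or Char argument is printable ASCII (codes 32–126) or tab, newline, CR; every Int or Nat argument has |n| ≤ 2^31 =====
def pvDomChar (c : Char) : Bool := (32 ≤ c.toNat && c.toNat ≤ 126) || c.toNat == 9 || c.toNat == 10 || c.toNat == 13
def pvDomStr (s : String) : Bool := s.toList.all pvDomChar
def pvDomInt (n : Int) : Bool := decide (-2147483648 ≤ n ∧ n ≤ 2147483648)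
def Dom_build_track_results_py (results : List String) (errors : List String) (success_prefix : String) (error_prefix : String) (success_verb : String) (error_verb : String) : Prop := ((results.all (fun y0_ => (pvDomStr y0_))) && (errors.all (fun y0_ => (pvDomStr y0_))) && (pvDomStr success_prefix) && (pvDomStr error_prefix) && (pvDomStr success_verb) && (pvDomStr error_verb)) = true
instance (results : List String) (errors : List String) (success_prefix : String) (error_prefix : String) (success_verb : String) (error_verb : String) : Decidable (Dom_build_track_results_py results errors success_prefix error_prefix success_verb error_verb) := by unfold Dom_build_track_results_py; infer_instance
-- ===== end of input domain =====

-- B replaces A's flat line-list-plus-join with a recursive renderer over a list of section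
-- descriptors that builds each section by direct string concatenation (Option accumulator).
-- Return value only; neither version mutates its arguments.

-- str.capitalize(): first char uppercased, rest lowercased (exact on the ASCII domain;
-- PySem has no capitalize primitive, so it is ported by hand via Chars.upperChar/lower).
def pyCapitalize (s : String) : String :=
  match s.toList with
  | [] => s
  | c :: rest => String.ofList (PySem.Chars.upperChar c :: PySem.Chars.lower rest)

-- ===== PORT A =====
def build_track_results_py (results : List String) (errors : List String) (success_prefix : String) (error_prefix : String) (success_verb : String) (error_verb : String) : String :=
  let output : List String := []
  let output := if results.isEmpty then output else
    (output ++ [success_prefix ++ " " ++ pyCapitalize success_verb ++ " " ++ PySem.Int.toStr (PySem.List.len results) ++ " track(s):"])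
      ++ results.map (fun r => "  " ++ r)
  let output := if errors.isEmpty then output else
    ((if output.isEmpty then output else output ++ [""])
      ++ [error_prefix ++ " " ++ pyCapitalize error_verb ++ " " ++ PySem.Int.toStr (PySem.List.len errors) ++ " track(s):"])
      ++ errors.map (fun e => "  " ++ e)
  if output.isEmpty then "No tracks were " ++ success_verb
  else PySem.Str.join "\n" output

-- ===== PORT B =====
-- the 'for it in items: block += f"\n  {it}"' loop of Source B
def btrAppendLines (items : List String) (block : String) : String :=
  items.foldl (fun acc it => acc ++ "\n  " ++ it) block

-- Source B's recursive 'render' over section descriptors (prefix, verb, items)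
def btrRender : List (String × String × List String) → Option String
  | [] => none
  | (pfx, verb, items) :: rest =>
    let tail := btrRender rest
    if items.isEmpty then tail
    else
      let block := btrAppendLines items
        (pfx ++ " " ++ pyCapitalize verb ++ " " ++ PySem.Int.toStr (PySem.List.len items) ++ " track(s):")
      match tail with
      | none => some block
      | some t => some (block ++ "\n\n" ++ t)

def build_track_results_py_alt (results : List String) (errors : List String) (success_prefix : String) (error_prefix : String) (success_verb : String) (error_verb : String) : String :=
  match btrRender [(success_prefix, success_verb, results), (error_prefix, error_verb, errors)] with
  | none => "No tracks were " ++ success_verb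
  | some m => m

-- ===== PRECONDITION & SPEC =====
def Spec_build_track_results_py (results : List String) (errors : List String) (success_prefix : String) (error_prefix : String) (success_verb : String) (error_verb : String) (out : String) : Prop := out = build_track_results_py_alt results errors success_prefix error_prefix success_verb error_verb
instance (results : List String) (errors : List String) (success_prefix : String) (error_prefix : String) (success_verb : String) (error_verb : String) (out : String) : Decidable (Spec_build_track_results_py results errors success_prefix error_prefix success_verb error_verb out) := by unfold Spec_build_track_results_py; infer_instance

-- ===== CLAIM (what is proved, stated in full; the proofs are below) =====
def Claim_equal_build_track_results_py : Prop := ∀ (results : List String) (errors : List String) (success_prefix : String) (error_prefix : String) (success_verb : String) (error_verb : String), Dom_build_track_results_py results errors success_prefix error_prefix success_verb error_verb → Spec_build_track_results_py results errors success_prefix error_prefix success_verb error_verb (build_track_results_py results errors success_prefix error_prefix success_verb error_verb)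

-- ===== LEMMAS AND PROOFS =====

-- join over a split list, both halves nonempty
theorem chars_join_append (sep : List Char) (xs ys : List (List Char)) (hx : xs ≠ []) (hy : ys ≠ []) :
    PySem.Chars.join sep (xs ++ ys) = PySem.Chars.join sep xs ++ sep ++ PySem.Chars.join sep ys := by
  induction xs with
  | nil => exact absurd rfl hx
  | cons a t ih =>
    cases t with
    | nil =>
      cases ys with
      | nil => exact absurd rfl hy
      | cons b u => simp [PySem.Chars.join_cons_cons, PySem.Chars.join_singleton]
    | cons a' t' =>
      have := ih (by simp)
      simp only [List.cons_append, PySem.Chars.join_cons_cons] at *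
      simp [this, List.append_assoc]

-- A's flat join with an empty separator line equals the two section joins glued by sep ++ sep
theorem chars_join_blank (nl h1 h2 : List Char) (m1 m2 : List (List Char)) :
    PySem.Chars.join nl (h1 :: (m1 ++ [[]] ++ [h2] ++ m2))
      = PySem.Chars.join nl (h1 :: m1) ++ nl ++ nl ++ PySem.Chars.join nl (h2 :: m2) := by
  have hsplit : h1 :: (m1 ++ [[]] ++ [h2] ++ m2)
      = (h1 :: m1) ++ ([([] : List Char)] ++ (h2 :: m2)) := by simp
  rw [hsplit, chars_join_append nl _ _ (by simp) (by simp),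
      chars_join_append nl [[]] _ (by simp) (by simp)]
  simp [PySem.Chars.join_singleton, List.append_assoc]

-- merging the head into the second element of a join
theorem chars_join_merge (sep a b : List Char) (l : List (List Char)) :
    PySem.Chars.join sep (a :: b :: l) = PySem.Chars.join sep ((a ++ sep ++ b) :: l) := by
  cases l with
  | nil => simp [PySem.Chars.join_cons_cons, PySem.Chars.join_singleton, List.append_assoc]
  | cons c u => simp [PySem.Chars.join_cons_cons, List.append_assoc]

-- A's joined section = B's concatenation loop
theorem join_eq_appendLines (items : List String) (h : String) :
    PySem.Str.join "\n" (h :: items.map (fun r => "  " ++ r)) = btrAppendLines items h := by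
  induction items generalizing h with
  | nil =>
    apply String.toList_inj.mp
    simp [btrAppendLines, PySem.Str.toList_join, PySem.Chars.join_singleton]
  | cons x xs ih =>
    have hstep : PySem.Str.join "\n" (h :: (x :: xs).map (fun r => "  " ++ r))
        = PySem.Str.join "\n" ((h ++ "\n  " ++ x) :: xs.map (fun r => "  " ++ r)) := by
      apply String.toList_inj.mp
      simp only [PySem.Str.toList_join, List.map_cons, String.toList_append]
      rw [chars_join_merge]
      simp [List.append_assoc]
    rw [hstep, ih]
    simp [btrAppendLines, List.foldl]

-- ===== VERDICT (by name: the statement is the Claim_ definition above) =====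
theorem build_track_results_py_spec : Claim_equal_build_track_results_py := by
  intro results errors sp ep sv ev _
  unfold Spec_build_track_results_py build_track_results_py build_track_results_py_alt
  cases results with
  | nil =>
    cases errors with
    | nil => simp [btrRender]
    | cons e es =>
      simp only [btrRender, List.isEmpty_cons, List.isEmpty_nil, if_true, if_false,
        Bool.false_eq_true, List.nil_append]
      exact join_eq_appendLines (e :: es) _
  | cons r rs =>
    cases errors with
    | nil =>
      simp only [btrRender, List.isEmpty_cons, List.isEmpty_nil, if_true, if_false,
        Bool.false_eq_true, List.nil_append]
      exact join_eq_appendLines (r :: rs) _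
    | cons e es =>
      simp only [btrRender, List.isEmpty_cons, Bool.false_eq_true, if_neg, not_false_eq_true,
        List.nil_append, List.cons_append]
      rw [← join_eq_appendLines (r :: rs), ← join_eq_appendLines (e :: es)]
      apply String.toList_inj.mp
      simp only [PySem.Str.toList_join, List.map_append, List.map_cons, List.map_nil,
        String.toList_empty, String.toList_append]
      rw [chars_join_blank]
      simp [List.append_assoc]
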